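-- pv_equiv track=rewrite | github.com/biocore/qiime | qiime/barcode.py | correct_barcode
-- ===== SOURCE A (Python) =====
-- def correct_barcode(query_seq, seq_possibilities):
--     """ finds closest (by nt seq edit distance) match to query_seq
--
--     assumes:
--     all sequences are same length
--     no sequence appears twice in seq_possibilities
--
--     returns (best_hit, min_dist)
--     * best_hit is closest sequence from seq_possibilities, or None if a tie
--     * min_dist is the edit distance between the query_seq and the best hit
--     cw1 = AAACCCGGGTTT (12 nucleotides)
--     cw2 = AAACCCGGGTTA (edit distance of 1 from cw1)
--     cw3 = AAACCCGGGTTG (edit distance of 1 from cw1)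
--     cw4 = AAACCCGGGTTC (edit distance of 1 from cw1)
--     cw5 = AAACCCGGGTGG (edit distance of 2 from cw1)
--     """
--     dists = [_edit_dist(query_seq, seq) for seq in seq_possibilities]
--     min_dist = min(dists)
--     number_mins = dists.count(min_dist)
--     if number_mins > 1:
--         return None, min_dist
--     else:
--         best_hit = seq_possibilities[dists.index(min_dist)]
--         return best_hit, min_dist
--
-- def _edit_dist(s1, s2):
--     """ computes edit (hamming) between to strings of equal len
--
--     designed for strings of nucleotides, not bits"""
--     dist = 0
--     for i in range(len(s1)):
--         if s1[i] != s2[i]: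
--             dist += 1
--     return dist
-- ===== SOURCE B (Python) =====
-- def correct_barcode(query_seq, seq_possibilities):
--     """Single-pass closest-Hamming-match: track best distance, best hit and a
--     tie flag instead of building a distance list and scanning it three times."""
--     best_dist = None
--     best_hit = None
--     tie = False
--     for seq in seq_possibilities:
--         d = sum(1 for a, b in zip(query_seq, seq) if a != b)
--         if best_dist is None or d < best_dist:
--             best_dist, best_hit, tie = d, seq, False
--         elif d == best_dist:
--             tie = True
--     if best_dist is None:
--         raise ValueError("seq_possibilities is empty")
--     if tie:
--         return None, best_dist
--     return best_hit, best_dist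
-- ===== Notes on version B (the rewrite author's own statement) =====
-- stated objective: simpler
-- what changed: Replaces the distance list plus three scans (min, count, index) by a single pass that maintains best_dist, best_hit and a tie flag, computing each Hamming distance once via zip.
import Mathlib
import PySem

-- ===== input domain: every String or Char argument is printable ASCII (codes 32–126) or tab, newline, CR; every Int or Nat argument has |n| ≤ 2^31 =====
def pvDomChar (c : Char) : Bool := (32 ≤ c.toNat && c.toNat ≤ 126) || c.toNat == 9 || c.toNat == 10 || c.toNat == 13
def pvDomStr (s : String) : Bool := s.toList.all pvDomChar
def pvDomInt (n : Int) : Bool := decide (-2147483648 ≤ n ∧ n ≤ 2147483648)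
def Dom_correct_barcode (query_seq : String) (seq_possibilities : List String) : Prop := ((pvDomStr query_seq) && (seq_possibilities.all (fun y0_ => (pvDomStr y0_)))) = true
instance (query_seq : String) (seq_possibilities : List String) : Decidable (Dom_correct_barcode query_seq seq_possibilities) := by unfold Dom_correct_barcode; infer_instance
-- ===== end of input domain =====

-- B replaces A's distance list plus three scans (min, count, index) by a single pass
-- keeping best distance, best hit and a tie flag; same results, no intermediate list.


-- ===== PORT A =====
-- _edit_dist: loop over range(len(s1)); s2[i] raises IndexError when i ≥ len(s2)
-- (excluded by Pre_); inside Pre_ both lookups are `some`, so the Option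
-- comparison is exactly Python's character comparison.
def editDistA (s1 s2 : List Char) : Int :=
  (List.range s1.length).foldl (fun dist i => if s1[i]? ≠ s2[i]? then dist + 1 else dist) 0

def correct_barcode (query_seq : String) (seq_possibilities : List String) : Option String × Int :=
  let dists := seq_possibilities.map (fun s => editDistA query_seq.toList s.toList)
  match PySem.List.min? dists (fun x => x) with
  | none => (none, 0)  -- Python: min([]) raises ValueError; excluded by Pre_
  | some min_dist =>
    let number_mins := PySem.List.count dists min_dist
    if 1 < number_mins then (none, min_dist)
    else
      let i := (PySem.List.index? dists min_dist).getD 0  -- always `some`: min_dist ∈ dists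
      (PySem.List.pyGet? seq_possibilities (i : Int), min_dist)  -- always `some`: i < length

-- ===== PORT B =====
-- sum(1 for a, b in zip(query_seq, seq) if a != b)
def hammingB (s1 s2 : List Char) : Int :=
  ((s1.zip s2).countP (fun p => p.1 != p.2) : Int)

-- loop body: strictly better → take it and clear the tie flag; equal → set the tie flag
def stepB (qc : List Char) (st : Option Int × Option String × Bool) (seq : String) :
    Option Int × Option String × Bool :=
  let d := hammingB qc seq.toList
  match st with
  | (none, _, _) => (some d, some seq, false)
  | (some bd, bh, tie) =>
    if d < bd then (some d, some seq, false)
    else if d = bd then (some bd, bh, true)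
    else (some bd, bh, tie)

def correct_barcode_alt (query_seq : String) (seq_possibilities : List String) : Option String × Int :=
  match seq_possibilities.foldl (stepB query_seq.toList) (none, none, false) with
  | (none, _, _) => (none, 0)  -- Python B: raise ValueError on empty input; excluded by Pre_
  | (some bd, bh, tie) => if tie then (none, bd) else (bh, bd)

-- ===== PRECONDITION & SPEC =====
-- Pre_ excludes exactly the inputs where Python A raises: the empty candidate list
-- (min([]) → ValueError) and candidates shorter than query_seq (s2[i] → IndexError).
def Pre_correct_barcode (query_seq : String) (seq_possibilities : List String) : Prop :=
  seq_possibilities ≠ [] ∧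
  ∀ s ∈ seq_possibilities, query_seq.toList.length ≤ s.toList.length
instance (query_seq : String) (seq_possibilities : List String) : Decidable (Pre_correct_barcode query_seq seq_possibilities) := by unfold Pre_correct_barcode; infer_instance

def pvWitness_correct_barcode : String × List String := ("ACGT", ["ACGA", "ACGG", "TCGT"])

def Spec_correct_barcode (query_seq : String) (seq_possibilities : List String) (out : Option String × Int) : Prop := out = correct_barcode_alt query_seq seq_possibilities
instance (query_seq : String) (seq_possibilities : List String) (out : Option String × Int) : Decidable (Spec_correct_barcode query_seq seq_possibilities out) := by unfold Spec_correct_barcode; infer_instance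

-- ===== CLAIM (what is proved, stated in full; the proofs are below) =====
def Claim_equal_correct_barcode : Prop := ∀ (query_seq : String) (seq_possibilities : List String), Dom_correct_barcode query_seq seq_possibilities → Pre_correct_barcode query_seq seq_possibilities → Spec_correct_barcode query_seq seq_possibilities (correct_barcode query_seq seq_possibilities)

-- ===== LEMMAS AND PROOFS =====

lemma countP_range_zip (s1 s2 : List Char) (h : s1.length ≤ s2.length) :
    (List.range s1.length).countP (fun i => decide (¬ s1[i]? = s2[i]?))
      = (s1.zip s2).countP (fun p => p.1 != p.2) := by
  induction s1 generalizing s2 with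
  | nil => simp
  | cons a t ih =>
    cases s2 with
    | nil => simp at h
    | cons b u =>
      simp only [List.length_cons, List.range_succ_eq_map, List.countP_cons, List.countP_map,
        List.zip_cons_cons]
      have := ih u (by simpa using h)
      simp only [List.getElem?_cons_zero] at *
      simp only [Function.comp_def, Nat.succ_eq_add_one, List.getElem?_cons_succ]
      simp only [decide_not] at this ⊢
      rw [this]
      simp [bne_iff_ne]

lemma editDistA_eq_hammingB (s1 s2 : List Char) (h : s1.length ≤ s2.length) :
    editDistA s1 s2 = hammingB s1 s2 := by
  unfold editDistA hammingB
  rw [PySem.List.foldl_ite_add_one (fun i => ¬ s1[i]? = s2[i]?)]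
  rw [countP_range_zip s1 s2 h]
  simp

def dsOf (qc : List Char) (l : List String) : List Int :=
  l.map (fun s => hammingB qc s.toList)


lemma min?_append_singleton (ds : List Int) (d m : Int)
    (h : PySem.List.min? ds (fun x => x) = some m) :
    PySem.List.min? (ds ++ [d]) (fun x => x) = some (min m d) := by
  cases ds with
  | nil => simp [PySem.List.min?] at h
  | cons a t =>
    rw [PySem.List.min?_id_cons] at h
    rw [List.cons_append, PySem.List.min?_id_cons, List.foldl_append]
    simp_all

lemma loopB_char (qc : List Char) :
    ∀ (l : List String), l ≠ [] →
    ∃ (m : Int) (i : Nat) (hi : i < l.length),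
      PySem.List.min? (dsOf qc l) (fun x => x) = some m ∧
      PySem.List.index? (dsOf qc l) m = some i ∧
      List.foldl (stepB qc) (none, none, false) l
        = (some m, some (l[i]), decide (1 < PySem.List.count (dsOf qc l) m)) := by
  intro l hne
  induction l using List.reverseRecOn with
  | nil => simp at hne
  | append_singleton l x ih =>
    rcases List.eq_nil_or_concat' l with rfl | h'
    · -- l = [], single element x
      refine ⟨hammingB qc x.toList, 0, by simp, ?_, ?_, ?_⟩
      · simp [dsOf, PySem.List.min?_id_cons]
      · simp [dsOf]
      · simp [stepB, dsOf, PySem.List.count_eq]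
    · have hl : l ≠ [] := by rcases h' with ⟨_, _, rfl⟩; simp
      obtain ⟨m, i, hi, hmin, hidx, hfold⟩ := ih hl
      set d := hammingB qc x.toList with hd
      have hds : dsOf qc (l ++ [x]) = dsOf qc l ++ [d] := by simp [dsOf, ← hd]
      have hmem : m ∈ dsOf qc l := PySem.List.min?_mem hmin
      have hcount1 : 1 ≤ (dsOf qc l).count m := List.count_pos_iff.mpr hmem
      rw [List.foldl_append, hfold]
      rcases lt_trichotomy d m with hlt | heq | hgt
      · -- strictly better: new min d, fresh hit, count 1
        have hnotmem : d ∉ dsOf qc l := by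
          intro hm
          have h2 : m ≤ d := PySem.List.min?_isMin hmin _ hm
          omega
        refine ⟨d, l.length, by simp, ?_, ?_, ?_⟩
        · rw [hds, min?_append_singleton _ _ _ hmin]
          simp [min_eq_right hlt.le]
        · rw [hds, PySem.List.index?_append_singleton_self _ _ hnotmem]
          simp [dsOf]
        · have hc : PySem.List.count (dsOf qc (l ++ [x])) d = 1 := by
            rw [hds, PySem.List.count_eq, List.count_append]
            simp [List.count_eq_zero.mpr hnotmem]
          rw [hc]
          simp [stepB, ← hd, hlt]
      · -- equal: keep hit, set tie
        have hi' : i < (l ++ [x]).length := by simp; omega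
        refine ⟨m, i, hi', ?_, ?_, ?_⟩
        · rw [hds, min?_append_singleton _ _ _ hmin]
          simp [heq]
        · rw [hds, PySem.List.index?_append_of_mem _ hmem, hidx]
        · have hc : PySem.List.count (dsOf qc (l ++ [x])) m = (dsOf qc l).count m + 1 := by
            rw [hds, PySem.List.count_eq, List.count_append]
            simp [heq]
          rw [hc]
          have hgl : (l ++ [x])[i] = l[i] := List.getElem_append_left hi
          rw [hgl]
          have ht : decide (1 < (dsOf qc l).count m + 1) = true := by
            simp; omega
          rw [ht]
          simp [stepB, ← hd, heq]
      · -- worse: state unchanged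
        have hi' : i < (l ++ [x]).length := by simp; omega
        refine ⟨m, i, hi', ?_, ?_, ?_⟩
        · rw [hds, min?_append_singleton _ _ _ hmin]
          simp [min_eq_left hgt.le]
        · rw [hds, PySem.List.index?_append_of_mem _ hmem, hidx]
        · have hc : PySem.List.count (dsOf qc (l ++ [x])) m = (dsOf qc l).count m := by
            rw [hds, PySem.List.count_eq, List.count_append]
            simp [List.count_singleton]
            omega
          rw [hc, List.getElem_append_left hi]
          have : ¬ d < m := by omega
          simp [stepB, ← hd, this, hgt.ne', PySem.List.count_eq]

-- ===== VERDICT (by name: the statement is the Claim_ definition above) =====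
theorem correct_barcode_spec : Claim_equal_correct_barcode := by
  intro q poss _ hpre
  obtain ⟨hne, hlen⟩ := hpre
  unfold Spec_correct_barcode correct_barcode correct_barcode_alt
  have hdists : poss.map (fun s => editDistA q.toList s.toList) = dsOf q.toList poss :=
    List.map_congr_left (fun s hs => editDistA_eq_hammingB _ _ (hlen s hs))
  obtain ⟨m, i, hi, hmin, hidx, hfold⟩ := loopB_char q.toList poss hne
  simp only [hdists, hmin, hidx, hfold, Option.getD_some]
  simp [PySem.List.count_eq, List.getElem?_eq_getElem hi]
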